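-- pv_equiv track=rewrite | github.com/Learem/jet-academy-python | calculator.py | error_syntax
-- ===== SOURCE A (Python) =====
-- def error_syntax(expr):
--     while "++" in expr:
--         expr = expr.replace("++", "+")
--     while "---" in expr:
--         expr = expr.replace("---", "-")
--     while "--" in expr:
--         expr = expr.replace("--", "+")
--     res = ""
--     for char in expr:
--         if char in "-+*/()^":
--             res += " " + char + " "
--         else:
--             res += char
--     lexems = res.split()
--     operators = []
--     brackets = []
--     for oper in lexems:
--         if len(operators) == 0:
--             operators.append(oper)
--             if oper == "(":
--                 brackets.append(oper)
--             if oper == ")":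
--                 if len(brackets) > 0:
--                     brackets.pop()
--                 else:
--                     operators = []
--                     break
--         elif oper in "+*/^":
--             if operators[-1] in "-+*/^(":
--                 operators = []
--                 break
--             else:
--                 operators.append(oper)
--         elif oper == "-":
--             if operators[-1] in "-+*/^":
--                 operators = []
--                 break
--             else:
--                 operators.append(oper)
--         elif oper == "(":
--             if operators[-1] not in "-+*/^(":
--                 operators = []
--                 break
--             else:
--                 operators.append(oper)
--                 brackets.append(oper)
--         elif oper == ")":
--             if operators[-1] in "-+*/^(":
--                 operators = []
--                 break
--             else:
--                 operators.append(oper)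
--                 if len(brackets) > 0:
--                     brackets.pop()
--                 else:
--                     operators = []
--                     break
--         else:
--             if operators[-1] not in "-+*/^(":
--                 operators = []
--                 break
--             else:
--                 if operators[-1] == "-":
--                     if len(operators) == 1:
--                         oper = "-" + oper
--                         del operators[-1]
--                     else:
--                         if operators[-2] == "(":
--                             oper = "-" + oper
--                             del operators[-1]
--                 operators.append(oper)
--     if len(brackets) > 0:
--         operators = []
--     return operators
-- ===== SOURCE B (Python) =====
-- def error_syntax(expr):
--     # One-pass lexer: collapse each maximal same-sign run by parity while
--     # tokenizing, then a single state-machine validation pass.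
--     OPS = "+-*/()^"
--     toks = []
--     i, n = 0, len(expr)
--     while i < n:
--         c = expr[i]
--         j = i + 1
--         if c in "+-":
--             while j < n and expr[j] == c:
--                 j += 1
--             toks.append("+" if c == "-" and (j - i) % 2 == 0 else c)
--         elif c in "*/()^":
--             toks.append(c)
--         elif c.isspace():
--             pass
--         else:
--             while j < n and expr[j] not in OPS and not expr[j].isspace():
--                 j += 1
--             toks.append(expr[i:j])
--         i = j
--     out = []
--     depth = 0
--     prev = ""        # previous token ("" before the first token)
--     unary = False    # last token is a '-' usable as a unary sign
--     for t in toks: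
--         if prev == "":
--             if t == ")":
--                 return []
--             if t == "(":
--                 depth += 1
--             out.append(t)
--             unary = t == "-"
--         elif t in ("+", "*", "/", "^"):
--             if prev in ("+", "-", "*", "/", "^", "("):
--                 return []
--             out.append(t)
--             unary = False
--         elif t == "-":
--             if prev in ("+", "-", "*", "/", "^"):
--                 return []
--             unary = prev == "("
--             out.append(t)
--         elif t == "(":
--             if prev not in ("+", "-", "*", "/", "^", "("):
--                 return []
--             depth += 1
--             out.append(t)
--             unary = False
--         elif t == ")":
--             if prev in ("+", "-", "*", "/", "^", "(") or depth == 0: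
--                 return []
--             depth -= 1
--             out.append(t)
--             unary = False
--         else:
--             if prev not in ("+", "-", "*", "/", "^", "("):
--                 return []
--             if unary:
--                 t = "-" + t
--                 out[-1] = t
--             else:
--                 out.append(t)
--             unary = False
--         prev = t
--     return [] if depth else out
-- ===== Notes on version B (the rewrite author's own statement) =====
-- stated objective: alternative
-- what changed: Replaced the repeated whole-string replace loops ('++','---','--') plus space-padding and split() by a single left-to-right lexing pass that collapses each maximal same-sign run by its minus-parity, and replaced the list-indexing validation (operators[-1]/operators[-2], brackets list) by a state machine carrying the previous token, a bracket depth counter and a unary-minus flag.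
import Mathlib
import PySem

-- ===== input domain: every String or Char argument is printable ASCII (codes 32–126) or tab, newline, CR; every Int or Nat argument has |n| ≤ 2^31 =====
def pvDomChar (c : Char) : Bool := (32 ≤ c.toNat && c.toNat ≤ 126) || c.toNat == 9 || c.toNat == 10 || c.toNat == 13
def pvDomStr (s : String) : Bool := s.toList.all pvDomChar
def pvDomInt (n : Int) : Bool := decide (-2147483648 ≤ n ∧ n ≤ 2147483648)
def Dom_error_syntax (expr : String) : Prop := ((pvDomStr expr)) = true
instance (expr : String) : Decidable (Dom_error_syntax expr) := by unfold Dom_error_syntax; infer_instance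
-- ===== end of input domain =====

-- B is an alternative single-pass implementation (not measurably faster in CPython):
-- one lexing pass that folds each same-sign run by minus-parity replaces A's repeated
-- replace loops + spacing + split, and a prev/depth/unary state machine replaces A's
-- operators[-1]/operators[-2]/brackets-list validation.

-- ===== PORT A =====

-- termination helper for the three 'while pat in expr' loops: one replace strictly shortens
theorem pvReplaceGo_len_le (old new : List Char) (hn : new.length < old.length) :
    ∀ fuel l acc, (PySem.Chars.replace.go old new fuel l acc).length ≤ acc.length + l.length := by
  intro fuel
  induction fuel with
  | zero => intro l acc; simp [PySem.Chars.replace.go]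
  | succ fuel ih =>
    intro l acc
    match l with
    | [] => simp [PySem.Chars.replace.go]
    | c :: t =>
      simp only [PySem.Chars.replace.go]
      split
      · rename_i hpre
        have hle : old.length ≤ (c :: t).length := (List.isPrefixOf_iff_prefix.mp hpre).length_le
        have := ih (List.drop old.length (c :: t)) (new.reverse ++ acc)
        simp only [List.length_append, List.length_reverse, List.length_drop] at this ⊢
        omega
      · have := ih t (c :: acc)
        simp only [List.length_cons] at this ⊢
        omega

theorem pvReplaceGo_len_lt (old new : List Char) (hn : new.length < old.length) (hold : old ≠ []) :
    ∀ fuel l acc, old <:+: l → l.length ≤ fuel →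
      (PySem.Chars.replace.go old new fuel l acc).length < acc.length + l.length := by
  intro fuel
  induction fuel with
  | zero =>
    intro l acc hinf hlen
    interval_cases h : l.length
    · have : l = [] := List.length_eq_zero_iff.mp h
      subst this
      exact absurd (List.eq_nil_of_infix_nil hinf) hold
  | succ fuel ih =>
    intro l acc hinf hlen
    match l with
    | [] => exact absurd (List.eq_nil_of_infix_nil hinf) hold
    | c :: t =>
      simp only [PySem.Chars.replace.go]
      split
      · rename_i hpre
        have hle : old.length ≤ (c :: t).length := (List.isPrefixOf_iff_prefix.mp hpre).length_le
        have h1 : 1 ≤ old.length := by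
          cases old with | nil => exact absurd rfl hold | cons _ _ => simp
        have := pvReplaceGo_len_le old new hn fuel (List.drop old.length (c :: t)) (new.reverse ++ acc)
        simp only [List.length_append, List.length_reverse, List.length_drop] at this ⊢
        omega
      · rename_i hpre
        have hinf' : old <:+: t := by
          rcases (List.infix_cons_iff).mp hinf with h | h
          · exact absurd (List.isPrefixOf_iff_prefix.mpr h) (by simpa using hpre)
          · exact h
        have := ih t (c :: acc) hinf' (by simpa using Nat.lt_succ_iff.mp (by simpa using hlen))
        simp only [List.length_cons] at this ⊢
        omega

theorem pvReplace_len_lt (s old new : List Char) (hn : new.length < old.length) (hold : old ≠ [])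
    (h : PySem.Chars.isIn old s = true) : (PySem.Chars.replace s old new).length < s.length := by
  have hinf : old <:+: s := (PySem.Chars.isIn_iff_infix _ _).mp h
  unfold PySem.Chars.replace
  rw [if_neg (by simp [List.isEmpty_iff, hold])]
  simpa using pvReplaceGo_len_lt old new hn hold s.length s [] hinf le_rfl

-- while "++" in expr: expr = expr.replace("++", "+")
def pvLoopPP (s : List Char) : List Char :=
  if h : PySem.Chars.isIn ['+', '+'] s = true then
    pvLoopPP (PySem.Chars.replace s ['+', '+'] ['+'])
  else s
termination_by s.length
decreasing_by exact pvReplace_len_lt s _ _ (by simp) (by simp) h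

-- while "---" in expr: expr = expr.replace("---", "-")
def pvLoopMMM (s : List Char) : List Char :=
  if h : PySem.Chars.isIn ['-', '-', '-'] s = true then
    pvLoopMMM (PySem.Chars.replace s ['-', '-', '-'] ['-'])
  else s
termination_by s.length
decreasing_by exact pvReplace_len_lt s _ _ (by simp) (by simp) h

-- while "--" in expr: expr = expr.replace("--", "+")
def pvLoopMM (s : List Char) : List Char :=
  if h : PySem.Chars.isIn ['-', '-'] s = true then
    pvLoopMM (PySem.Chars.replace s ['-', '-'] ['+'])
  else s
termination_by s.length
decreasing_by exact pvReplace_len_lt s _ _ (by simp) (by simp) h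

-- res = ""; for char in expr: res += " "+char+" " if operator else char
def pvSpaced (s : List Char) : List Char :=
  s.foldl (fun res c => res ++ (if c ∈ ['-', '+', '*', '/', '(', ')', '^'] then [' ', c, ' '] else [c])) []

-- the validation loop of A: operators and brackets kept in reverse (append = cons)
def pvValA : List (List Char) → List (List Char) → List (List Char) → List (List Char)
  | [], ops, br => if br.length > 0 then [] else ops.reverse
  | oper :: rest, ops, br =>
    match ops with
    | [] =>
      if oper = ['('] then pvValA rest [oper] (['('] :: br)
      else if oper = [')'] then
        (match br with
         | _ :: brT => pvValA rest [oper] brT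
         | [] => [])
      else pvValA rest [oper] br
    | top :: opsT =>
      if PySem.Chars.isIn oper ['+', '*', '/', '^'] then
        if PySem.Chars.isIn top ['-', '+', '*', '/', '^', '('] then []
        else pvValA rest (oper :: top :: opsT) br
      else if oper = ['-'] then
        if PySem.Chars.isIn top ['-', '+', '*', '/', '^'] then []
        else pvValA rest (oper :: top :: opsT) br
      else if oper = ['('] then
        if ¬ PySem.Chars.isIn top ['-', '+', '*', '/', '^', '('] then []
        else pvValA rest (oper :: top :: opsT) (['('] :: br)
      else if oper = [')'] then
        if PySem.Chars.isIn top ['-', '+', '*', '/', '^', '('] then []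
        else
          (match br with
           | _ :: brT => pvValA rest (oper :: top :: opsT) brT
           | [] => [])
      else
        if ¬ PySem.Chars.isIn top ['-', '+', '*', '/', '^', '('] then []
        else
          if top = ['-'] then
            if opsT.length = 0 then pvValA rest (('-' :: oper) :: opsT) br
            else if opsT.headD [] = ['('] then pvValA rest (('-' :: oper) :: opsT) br
            else pvValA rest (oper :: top :: opsT) br
          else pvValA rest (oper :: top :: opsT) br

def error_syntax (expr : String) : List String :=
  let s1 := pvLoopPP expr.toList
  let s2 := pvLoopMMM s1
  let s3 := pvLoopMM s2
  let lexems := PySem.Chars.split₀ (pvSpaced s3)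
  (pvValA lexems [] []).map String.ofList

-- ===== PORT B =====

-- a character that continues an operand token: not an operator, not whitespace
def pvWordChar (c : Char) : Bool :=
  !(c ∈ ['+', '-', '*', '/', '(', ')', '^']) && !(PySem.Chars.isspace c)

-- leading run length of character c
def pvRun (c : Char) : List Char → Nat
  | [] => 0
  | d :: t => if d = c then pvRun c t + 1 else 0

-- B's lexer: one pass, sign runs folded by parity
def pvLexB : List Char → List (List Char)
  | [] => []
  | c :: t =>
    if c = '+' ∨ c = '-' then
      let k := pvRun c t
      (if c = '-' ∧ (k + 1) % 2 = 0 then ['+'] else [c]) :: pvLexB (t.drop k)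
    else if c ∈ ['*', '/', '(', ')', '^'] then [c] :: pvLexB t
    else if PySem.Chars.isspace c then pvLexB t
    else (c :: t.takeWhile pvWordChar) :: pvLexB (t.dropWhile pvWordChar)
termination_by s => s.length
decreasing_by
  · simpa using Nat.lt_succ_of_le (Nat.sub_le t.length (pvRun c t))
  · simp
  · simp
  · exact Nat.lt_succ_of_le (List.length_dropWhile_le pvWordChar t)

def pvOps6 : List (List Char) := [['+'], ['-'], ['*'], ['/'], ['^'], ['(']]
def pvOps5 : List (List Char) := [['+'], ['-'], ['*'], ['/'], ['^']]

-- B's validation state machine: out kept in reverse, depth, previous token, unary flag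
def pvValB : List (List Char) → List (List Char) → Nat → List Char → Bool → List (List Char)
  | [], outRev, depth, _, _ => if depth ≠ 0 then [] else outRev.reverse
  | t :: rest, outRev, depth, prev, unary =>
    if prev = [] then
      if t = [')'] then []
      else pvValB rest (t :: outRev) (if t = ['('] then depth + 1 else depth) t (t = ['-'])
    else if t = ['+'] ∨ t = ['*'] ∨ t = ['/'] ∨ t = ['^'] then
      if prev ∈ pvOps6 then [] else pvValB rest (t :: outRev) depth t false
    else if t = ['-'] then
      if prev ∈ pvOps5 then [] else pvValB rest (t :: outRev) depth t (prev = ['('])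
    else if t = ['('] then
      if prev ∉ pvOps6 then [] else pvValB rest (t :: outRev) (depth + 1) t false
    else if t = [')'] then
      if prev ∈ pvOps6 ∨ depth = 0 then [] else pvValB rest (t :: outRev) (depth - 1) t false
    else
      if prev ∉ pvOps6 then []
      else if unary then pvValB rest (('-' :: t) :: outRev.tail) depth ('-' :: t) false
      else pvValB rest (t :: outRev) depth t false

def error_syntax_alt (expr : String) : List String :=
  (pvValB (pvLexB expr.toList) [] 0 [] false).map String.ofList

-- ===== PRECONDITION & SPEC =====
def Spec_error_syntax (expr : String) (out : List String) : Prop := out = error_syntax_alt expr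
instance (expr : String) (out : List String) : Decidable (Spec_error_syntax expr out) := by unfold Spec_error_syntax; infer_instance

-- ===== CLAIM (what is proved, stated in full; the proofs are below) =====
def Claim_equal_error_syntax : Prop := ∀ (expr : String), Dom_error_syntax expr → Spec_error_syntax expr (error_syntax expr)

-- ===== LEMMAS AND PROOFS =====
-- spec-level normalization functions
def pvPhiPP : List Char → List Char
  | [] => []
  | [c] => [c]
  | c :: d :: t => if c = '+' ∧ d = '+' then '+' :: pvPhiPP t else c :: pvPhiPP (d :: t)

def pvPhiMMM : List Char → List Char
  | [] => []
  | [c] => [c]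
  | [c, d] => [c, d]
  | c :: d :: e :: t =>
    if c = '-' ∧ d = '-' ∧ e = '-' then '-' :: pvPhiMMM t else c :: pvPhiMMM (d :: e :: t)

def pvPhiMM : List Char → List Char
  | [] => []
  | [c] => [c]
  | c :: d :: t => if c = '-' ∧ d = '-' then '+' :: pvPhiMM t else c :: pvPhiMM (d :: t)

def pvCP : List Char → List Char
  | [] => []
  | c :: t =>
    if c = '+' then '+' :: pvCP (t.drop (pvRun '+' t)) else c :: pvCP t
termination_by s => s.length
decreasing_by
  · simpa using Nat.lt_succ_of_le (Nat.sub_le t.length (pvRun '+' t))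
  · simp

def pvCM3 : List Char → List Char
  | [] => []
  | c :: t =>
    if c = '-' then
      (if (pvRun '-' t + 1) % 2 = 1 then ['-'] else ['-', '-']) ++ pvCM3 (t.drop (pvRun '-' t))
    else c :: pvCM3 t
termination_by s => s.length
decreasing_by
  · simpa using Nat.lt_succ_of_le (Nat.sub_le t.length (pvRun '-' t))
  · simp

-- replace with the three concrete patterns is the corresponding one-pass rewrite
theorem pvGoPP : ∀ fuel l acc, l.length ≤ fuel →
    PySem.Chars.replace.go ['+', '+'] ['+'] fuel l acc = acc.reverse ++ pvPhiPP l := by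
  intro fuel
  induction fuel with
  | zero =>
    intro l acc h
    have : l = [] := List.length_eq_zero_iff.mp (Nat.le_zero.mp h)
    subst this; simp [PySem.Chars.replace.go, pvPhiPP]
  | succ fuel ih =>
    intro l acc h
    match l with
    | [] => simp [PySem.Chars.replace.go, pvPhiPP]
    | [c] =>
      have hpre : (['+', '+'].isPrefixOf [c]) = false := by simp [List.isPrefixOf]
      simp only [PySem.Chars.replace.go, hpre, Bool.false_eq_true, if_false]
      rw [ih [] (c :: acc) (by simp)]
      simp [pvPhiPP]
    | c :: d :: t =>
      simp only [List.length_cons] at h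
      by_cases hc : c = '+' ∧ d = '+'
      · obtain ⟨hc1, hc2⟩ := hc
        subst hc1; subst hc2
        simp only [PySem.Chars.replace.go, List.isPrefixOf, BEq.rfl, Bool.and_self, if_pos]
        rw [show List.drop (['+', '+'].length) ('+' :: '+' :: t) = t from rfl]
        rw [ih t (['+'].reverse ++ acc) (by omega)]
        simp [pvPhiPP]
      · have hpre : (['+', '+'].isPrefixOf (c :: d :: t)) = false := by
          simp only [List.isPrefixOf, Bool.and_true,
            Bool.and_eq_false_iff, beq_eq_false_iff_ne, ne_eq]
          rcases not_and_or.mp hc with h1 | h1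
          · exact Or.inl fun h => h1 h.symm
          · exact Or.inr fun h => h1 h.symm
        simp only [PySem.Chars.replace.go, hpre, Bool.false_eq_true, if_false]
        rw [ih (d :: t) (c :: acc) (by simp only [List.length_cons]; omega)]
        simp [pvPhiPP, hc]
theorem pvGoMMM : ∀ fuel l acc, l.length ≤ fuel →
    PySem.Chars.replace.go ['-', '-', '-'] ['-'] fuel l acc = acc.reverse ++ pvPhiMMM l := by
  intro fuel
  induction fuel with
  | zero =>
    intro l acc h
    have : l = [] := List.length_eq_zero_iff.mp (Nat.le_zero.mp h)
    subst this; simp [PySem.Chars.replace.go, pvPhiMMM]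
  | succ fuel ih =>
    intro l acc h
    match l with
    | [] => simp [PySem.Chars.replace.go, pvPhiMMM]
    | [c] =>
      have hpre : (['-', '-', '-'].isPrefixOf [c]) = false := by simp [List.isPrefixOf]
      simp only [PySem.Chars.replace.go, hpre, Bool.false_eq_true, if_false]
      rw [ih [] (c :: acc) (by simp)]
      simp [pvPhiMMM]
    | [c, d] =>
      have hpre : (['-', '-', '-'].isPrefixOf [c, d]) = false := by simp [List.isPrefixOf]
      simp only [PySem.Chars.replace.go, hpre, Bool.false_eq_true, if_false]
      rw [ih [d] (c :: acc) (by simp only [List.length_cons] at h ⊢; omega)]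
      simp [pvPhiMMM]
    | c :: d :: e :: t =>
      simp only [List.length_cons] at h
      by_cases hc : c = '-' ∧ d = '-' ∧ e = '-'
      · obtain ⟨hc1, hc2, hc3⟩ := hc
        subst hc1; subst hc2; subst hc3
        simp only [PySem.Chars.replace.go, List.isPrefixOf, BEq.rfl, Bool.and_self, if_pos]
        rw [show List.drop (['-', '-', '-'].length) ('-' :: '-' :: '-' :: t) = t from rfl]
        rw [ih t (['-'].reverse ++ acc) (by omega)]
        simp [pvPhiMMM]
      · have hpre : (['-', '-', '-'].isPrefixOf (c :: d :: e :: t)) = false := by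
          simp only [List.isPrefixOf, Bool.and_true,
            Bool.and_eq_false_iff, beq_eq_false_iff_ne, ne_eq]
          by_cases h1 : c = '-'
          · subst h1
            by_cases h2 : d = '-'
            · subst h2
              refine Or.inr (Or.inr ?_)
              have h3 : ¬ e = '-' := fun h3 => hc ⟨rfl, rfl, h3⟩
              simp [List.isPrefixOf, beq_eq_false_iff_ne]
              exact fun h => h3 h.symm
            · exact Or.inr (Or.inl fun h => h2 h.symm)
          · exact Or.inl fun h => h1 h.symm
        simp only [PySem.Chars.replace.go, hpre, Bool.false_eq_true, if_false]
        rw [ih (d :: e :: t) (c :: acc) (by simp only [List.length_cons]; omega)]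
        simp [pvPhiMMM, hc]

theorem pvGoMM : ∀ fuel l acc, l.length ≤ fuel →
    PySem.Chars.replace.go ['-', '-'] ['+'] fuel l acc = acc.reverse ++ pvPhiMM l := by
  intro fuel
  induction fuel with
  | zero =>
    intro l acc h
    have : l = [] := List.length_eq_zero_iff.mp (Nat.le_zero.mp h)
    subst this; simp [PySem.Chars.replace.go, pvPhiMM]
  | succ fuel ih =>
    intro l acc h
    match l with
    | [] => simp [PySem.Chars.replace.go, pvPhiMM]
    | [c] =>
      have hpre : (['-', '-'].isPrefixOf [c]) = false := by simp [List.isPrefixOf]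
      simp only [PySem.Chars.replace.go, hpre, Bool.false_eq_true, if_false]
      rw [ih [] (c :: acc) (by simp)]
      simp [pvPhiMM]
    | c :: d :: t =>
      simp only [List.length_cons] at h
      by_cases hc : c = '-' ∧ d = '-'
      · obtain ⟨hc1, hc2⟩ := hc
        subst hc1; subst hc2
        simp only [PySem.Chars.replace.go, List.isPrefixOf, BEq.rfl, Bool.and_self, if_pos]
        rw [show List.drop (['-', '-'].length) ('-' :: '-' :: t) = t from rfl]
        rw [ih t (['+'].reverse ++ acc) (by omega)]
        simp [pvPhiMM]
      · have hpre : (['-', '-'].isPrefixOf (c :: d :: t)) = false := by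
          simp only [List.isPrefixOf, Bool.and_true,
            Bool.and_eq_false_iff, beq_eq_false_iff_ne, ne_eq]
          rcases not_and_or.mp hc with h1 | h1
          · exact Or.inl fun h => h1 h.symm
          · exact Or.inr fun h => h1 h.symm
        simp only [PySem.Chars.replace.go, hpre, Bool.false_eq_true, if_false]
        rw [ih (d :: t) (c :: acc) (by simp only [List.length_cons]; omega)]
        simp [pvPhiMM, hc]

theorem pvReplacePP (s : List Char) : PySem.Chars.replace s ['+', '+'] ['+'] = pvPhiPP s := by
  unfold PySem.Chars.replace
  rw [if_neg (by simp)]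
  simpa using pvGoPP s.length s [] le_rfl

theorem pvReplaceMMM (s : List Char) : PySem.Chars.replace s ['-', '-', '-'] ['-'] = pvPhiMMM s := by
  unfold PySem.Chars.replace
  rw [if_neg (by simp)]
  simpa using pvGoMMM s.length s [] le_rfl

theorem pvReplaceMM (s : List Char) : PySem.Chars.replace s ['-', '-'] ['+'] = pvPhiMM s := by
  unfold PySem.Chars.replace
  rw [if_neg (by simp)]
  simpa using pvGoMM s.length s [] le_rfl
-- run decomposition machinery
theorem pvRun_eq_zero (c : Char) (t : List Char) (h : t.head? ≠ some c) : pvRun c t = 0 := by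
  cases t with
  | nil => rfl
  | cons d t => simp only [List.head?_cons, ne_eq, Option.some.injEq] at h; simp [pvRun, h]

theorem pvRun_replicate (c : Char) (k : Nat) (t : List Char) (h : t.head? ≠ some c) :
    pvRun c (List.replicate k c ++ t) = k := by
  induction k with
  | zero => simpa using pvRun_eq_zero c t h
  | succ k ih => simp [List.replicate_succ, pvRun, ih]

theorem pvDecomp (c : Char) (t : List Char) :
    ∃ t', t = List.replicate (pvRun c t) c ++ t' ∧ t'.head? ≠ some c := by
  induction t with
  | nil => exact ⟨[], by simp [pvRun]⟩
  | cons d t ih =>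
    by_cases hd : d = c
    · subst hd
      obtain ⟨t', h1, h2⟩ := ih
      exact ⟨t', by simp [pvRun, List.replicate_succ]; exact h1, h2⟩
    · exact ⟨d :: t, by simp [pvRun, hd], by simp [hd]⟩

theorem pvDropRun (c : Char) (k : Nat) (t : List Char) :
    (List.replicate k c ++ t).drop k = t := by
  simpa using List.drop_left (l₁ := List.replicate k c) (l₂ := t)

-- pass-through / run lemmas for the one-pass rewrites
theorem pvPhiPP_cons_ne (c : Char) (t : List Char) (h : c ≠ '+') :
    pvPhiPP (c :: t) = c :: pvPhiPP t := by
  cases t with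
  | nil => simp [pvPhiPP]
  | cons d t => simp [pvPhiPP, h]

theorem pvPhiMM_cons_ne (c : Char) (t : List Char) (h : c ≠ '-') :
    pvPhiMM (c :: t) = c :: pvPhiMM t := by
  cases t with
  | nil => simp [pvPhiMM]
  | cons d t => simp [pvPhiMM, h]

theorem pvPhiMMM_cons_ne (c : Char) (t : List Char) (h : c ≠ '-') :
    pvPhiMMM (c :: t) = c :: pvPhiMMM t := by
  match t with
  | [] => simp [pvPhiMMM]
  | [d] => simp [pvPhiMMM]
  | d :: e :: t => simp [pvPhiMMM, h]

theorem pvPhiMM_cons1 (t : List Char) (h : t.head? ≠ some '-') :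
    pvPhiMM ('-' :: t) = '-' :: pvPhiMM t := by
  cases t with
  | nil => simp [pvPhiMM]
  | cons d t =>
    simp only [List.head?_cons, ne_eq, Option.some.injEq] at h
    simp [pvPhiMM, h]

theorem pvPhiMM_two (t : List Char) : pvPhiMM ('-' :: '-' :: t) = '+' :: pvPhiMM t := by
  simp [pvPhiMM]

theorem pvPhiMMM_cons1 (t : List Char) (h : t.head? ≠ some '-') :
    pvPhiMMM ('-' :: t) = '-' :: pvPhiMMM t := by
  match t with
  | [] => simp [pvPhiMMM]
  | [d] => simp only [List.head?_cons, ne_eq, Option.some.injEq] at h; simp [pvPhiMMM, h]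
  | d :: e :: t =>
    simp only [List.head?_cons, ne_eq, Option.some.injEq] at h
    simp [pvPhiMMM, h]

theorem pvPhiMMM_cons2 (t : List Char) (h : t.head? ≠ some '-') :
    pvPhiMMM ('-' :: '-' :: t) = '-' :: '-' :: pvPhiMMM t := by
  match t with
  | [] => simp [pvPhiMMM]
  | e :: t =>
    simp only [List.head?_cons, ne_eq, Option.some.injEq] at h
    rw [show pvPhiMMM ('-' :: '-' :: e :: t) = '-' :: pvPhiMMM ('-' :: e :: t) by
      simp [pvPhiMMM, h]]
    rw [pvPhiMMM_cons1 (e :: t) (by simp [h])]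

theorem pvPhiPP_run : ∀ k t, t.head? ≠ some '+' →
    pvPhiPP (List.replicate k '+' ++ t) = List.replicate ((k + 1) / 2) '+' ++ pvPhiPP t := by
  intro k
  induction k using Nat.strong_induction_on with
  | _ k ih =>
    match k with
    | 0 => intro t ht; simp
    | 1 =>
      intro t ht
      cases t with
      | nil => simp [pvPhiPP]
      | cons d t =>
        simp only [List.head?_cons, ne_eq, Option.some.injEq] at ht
        simp [pvPhiPP, ht]
    | (k + 2) =>
      intro t ht
      rw [show List.replicate (k + 2) '+' ++ t = '+' :: '+' :: (List.replicate k '+' ++ t) by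
        simp [List.replicate_succ]]
      rw [show pvPhiPP ('+' :: '+' :: (List.replicate k '+' ++ t)) =
          '+' :: pvPhiPP (List.replicate k '+' ++ t) by simp [pvPhiPP]]
      rw [ih k (by omega) t ht]
      rw [show (k + 2 + 1) / 2 = (k + 1) / 2 + 1 by omega, List.replicate_succ]
      simp

-- the fixpoint shape of the '---' loop on a minus-run
def pvG : Nat → Nat
  | 0 => 0
  | 1 => 1
  | 2 => 2
  | (k + 3) => pvG k + 1

theorem pvG_mod (k : Nat) : pvG k % 2 = k % 2 := by
  induction k using Nat.strong_induction_on with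
  | _ k ih =>
    match k with
    | 0 => rfl
    | 1 => rfl
    | 2 => rfl
    | (k + 3) =>
      have := ih k (by omega)
      simp only [pvG]
      omega

theorem pvG_pos (k : Nat) (h : 1 ≤ k) : 1 ≤ pvG k := by
  induction k using Nat.strong_induction_on with
  | _ k ih =>
    match k with
    | 0 => omega
    | 1 => simp [pvG]
    | 2 => simp [pvG]
    | (k + 3) => simp [pvG]

theorem pvPhiMMM_run : ∀ k t, t.head? ≠ some '-' →
    pvPhiMMM (List.replicate k '-' ++ t) = List.replicate (pvG k) '-' ++ pvPhiMMM t := by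
  intro k
  induction k using Nat.strong_induction_on with
  | _ k ih =>
    match k with
    | 0 => intro t ht; simp [pvG]
    | 1 =>
      intro t ht
      simpa [pvG] using pvPhiMMM_cons1 t ht
    | 2 =>
      intro t ht
      have := pvPhiMMM_cons2 t ht
      simpa [pvG, List.replicate_succ] using this
    | (k + 3) =>
      intro t ht
      rw [show List.replicate (k + 3) '-' ++ t = '-' :: '-' :: '-' :: (List.replicate k '-' ++ t) by
        simp [List.replicate_succ]]
      rw [show pvPhiMMM ('-' :: '-' :: '-' :: (List.replicate k '-' ++ t)) =
          '-' :: pvPhiMMM (List.replicate k '-' ++ t) by simp [pvPhiMMM]]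
      rw [ih k (by omega) t ht]
      rw [show pvG (k + 3) = pvG k + 1 from rfl, List.replicate_succ]
      simp
-- cP / cM3 unfolding lemmas
theorem pvCP_cons_ne (c : Char) (t : List Char) (h : c ≠ '+') : pvCP (c :: t) = c :: pvCP t := by
  rw [pvCP]; simp [h]

theorem pvCP_cons_run (t : List Char) :
    pvCP ('+' :: t) = '+' :: pvCP (t.drop (pvRun '+' t)) := by
  rw [pvCP]; simp

theorem pvCP_run (k : Nat) (t : List Char) (h : t.head? ≠ some '+') :
    pvCP (List.replicate (k + 1) '+' ++ t) = '+' :: pvCP t := by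
  rw [show List.replicate (k + 1) '+' ++ t = '+' :: (List.replicate k '+' ++ t) by
    simp [List.replicate_succ]]
  rw [pvCP_cons_run, pvRun_replicate '+' k t h, pvDropRun]

theorem pvCM3_cons_ne (c : Char) (t : List Char) (h : c ≠ '-') : pvCM3 (c :: t) = c :: pvCM3 t := by
  rw [pvCM3]; simp [h]

theorem pvCM3_cons_run (t : List Char) :
    pvCM3 ('-' :: t) =
      (if (pvRun '-' t + 1) % 2 = 1 then ['-'] else ['-', '-']) ++ pvCM3 (t.drop (pvRun '-' t)) := by
  rw [pvCM3]; simp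

theorem pvCM3_run (k : Nat) (t : List Char) (h : t.head? ≠ some '-') :
    pvCM3 (List.replicate (k + 1) '-' ++ t) =
      (if (k + 1) % 2 = 1 then ['-'] else ['-', '-']) ++ pvCM3 t := by
  rw [show List.replicate (k + 1) '-' ++ t = '-' :: (List.replicate k '-' ++ t) by
    simp [List.replicate_succ]]
  rw [pvCM3_cons_run, pvRun_replicate '-' k t h, pvDropRun]

-- head-shape preservation
theorem pvPhiPP_headne (t : List Char) (h : t.head? ≠ some '+') :
    (pvPhiPP t).head? ≠ some '+' := by
  cases t with
  | nil => simp [pvPhiPP]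
  | cons c u =>
    simp only [List.head?_cons, ne_eq, Option.some.injEq] at h
    rw [pvPhiPP_cons_ne c u h]; simpa using h

theorem pvPhiMMM_headne (t : List Char) (h : t.head? ≠ some '-') :
    (pvPhiMMM t).head? ≠ some '-' := by
  cases t with
  | nil => simp [pvPhiMMM]
  | cons c u =>
    simp only [List.head?_cons, ne_eq, Option.some.injEq] at h
    rw [pvPhiMMM_cons_ne c u h]; simpa using h

theorem pvPhiMM_headne (t : List Char) (h : t.head? ≠ some '-') :
    (pvPhiMM t).head? ≠ some '-' := by
  cases t with
  | nil => simp [pvPhiMM]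
  | cons c u =>
    simp only [List.head?_cons, ne_eq, Option.some.injEq] at h
    rw [pvPhiMM_cons_ne c u h]; simpa using h

theorem pvCP_headne (t : List Char) (h : t.head? ≠ some '-') :
    (pvCP t).head? ≠ some '-' := by
  cases t with
  | nil => simp [pvCP]
  | cons c u =>
    simp only [List.head?_cons, ne_eq, Option.some.injEq] at h
    by_cases hc : c = '+'
    · subst hc; rw [pvCP_cons_run]; simp
    · rw [pvCP_cons_ne c u hc]; simpa using h

theorem pvCM3_headne (t : List Char) (h : t.head? ≠ some '-') :
    (pvCM3 t).head? ≠ some '-' := by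
  cases t with
  | nil => simp [pvCM3]
  | cons c u =>
    simp only [List.head?_cons, ne_eq, Option.some.injEq] at h
    rw [pvCM3_cons_ne c u h]; simpa using h

-- infix helpers for two- and three-character patterns
theorem pvInfix2_cases (a b x : Char) (X : List Char) (h : [a, b] <:+: (x :: X)) :
    (x = a ∧ X.head? = some b) ∨ [a, b] <:+: X := by
  rcases List.infix_cons_iff.mp h with h | h
  · obtain ⟨r, hr⟩ := h
    simp only [List.cons_append, List.nil_append, List.cons.injEq] at hr
    exact Or.inl ⟨hr.1.symm, by rw [← hr.2]; simp⟩
  · exact Or.inr h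

theorem pvInfix2_intro (a b : Char) (r : List Char) : [a, b] <:+: (a :: b :: r) :=
  ⟨[], r, by simp⟩

theorem pvInfix3_intro (a b c : Char) (r : List Char) : [a, b, c] <:+: (a :: b :: c :: r) :=
  ⟨[], r, by simp⟩

theorem pvInfix_cons_of (l : List Char) (x : Char) (X : List Char) (h : l <:+: X) :
    l <:+: (x :: X) := List.infix_cons_iff.mpr (Or.inr h)

-- no occurrence ⇒ the pass is the identity
theorem pvNoPP_id (s : List Char) (h : ¬ ['+', '+'] <:+: s) : pvCP s = s := by
  induction s with
  | nil => simp [pvCP]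
  | cons c t ih =>
    by_cases hc : c = '+'
    · subst hc
      have ht : t.head? ≠ some '+' := by
        intro hh
        cases t with
        | nil => simp at hh
        | cons d t' =>
          simp only [List.head?_cons, Option.some.injEq] at hh
          subst hh
          exact h (pvInfix2_intro '+' '+' t')
      rw [pvCP_cons_run, pvRun_eq_zero '+' t ht, List.drop_zero,
        ih (fun hi => h (pvInfix_cons_of _ _ _ hi))]
    · rw [pvCP_cons_ne c t hc, ih (fun hi => h (pvInfix_cons_of _ _ _ hi))]

theorem pvNoMMM_id : ∀ n s, s.length ≤ n → ¬ ['-', '-', '-'] <:+: s → pvCM3 s = s := by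
  intro n
  induction n with
  | zero =>
    intro s hl _
    have : s = [] := List.length_eq_zero_iff.mp (Nat.le_zero.mp hl)
    subst this; simp [pvCM3]
  | succ n ih =>
    intro s hl h
    cases s with
    | nil => simp [pvCM3]
    | cons c t =>
      simp only [List.length_cons] at hl
      by_cases hc : c = '-'
      · subst hc
        obtain ⟨t', hdec, hhd⟩ := pvDecomp '-' t
        have hr : pvRun '-' t ≤ 1 := by
          by_contra hr
          push_neg at hr
          apply h
          rw [hdec, show List.replicate (pvRun '-' t) '-' =
            '-' :: '-' :: List.replicate (pvRun '-' t - 2) '-' by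
              rw [show pvRun '-' t = (pvRun '-' t - 2) + 1 + 1 by omega]
              simp [List.replicate_succ]]
          exact pvInfix3_intro '-' '-' '-' _
        rw [pvCM3_cons_run]
        interval_cases hr2 : pvRun '-' t
        · simp only [List.drop_zero]
          rw [ih t (by omega) (fun hi => h (pvInfix_cons_of _ _ _ hi))]
          simp
        · rw [hdec] at hl ⊢
          simp only [List.replicate_one, List.singleton_append, List.drop_succ_cons,
            List.drop_zero, List.length_cons] at hl ⊢
          rw [ih t' (by omega) (fun hi => h (pvInfix_cons_of _ _ _ (by
            rw [hdec]
            simp only [List.replicate_one, List.singleton_append]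
            exact pvInfix_cons_of _ _ _ hi)))]
          simp
      · rw [pvCM3_cons_ne c t hc, ih t (by omega) (fun hi => h (pvInfix_cons_of _ _ _ hi))]

theorem pvNoMM_id : ∀ n s, s.length ≤ n → ¬ ['-', '-'] <:+: s → pvPhiMM s = s := by
  intro n
  induction n with
  | zero =>
    intro s hl _
    have : s = [] := List.length_eq_zero_iff.mp (Nat.le_zero.mp hl)
    subst this; simp [pvPhiMM]
  | succ n ih =>
    intro s hl h
    match s with
    | [] => simp [pvPhiMM]
    | [c] => simp [pvPhiMM]
    | c :: d :: t =>
      simp only [List.length_cons] at hl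
      by_cases hc : c = '-' ∧ d = '-'
      · obtain ⟨h1, h2⟩ := hc
        subst h1; subst h2
        exact absurd (pvInfix2_intro '-' '-' t) h
      · rw [show pvPhiMM (c :: d :: t) = c :: pvPhiMM (d :: t) by simp [pvPhiMM, hc]]
        rw [ih (d :: t) (by simp only [List.length_cons]; omega)
          (fun hi => h (pvInfix_cons_of _ _ _ hi))]

theorem pvPhiMM_noadj : ∀ n s, s.length ≤ n → ¬ ['-', '-'] <:+: pvPhiMM s := by
  intro n
  induction n with
  | zero =>
    intro s hl
    have : s = [] := List.length_eq_zero_iff.mp (Nat.le_zero.mp hl)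
    subst this; simp [pvPhiMM]
  | succ n ih =>
    intro s hl
    match s with
    | [] => simp [pvPhiMM]
    | [c] =>
      simp only [pvPhiMM]
      intro hi
      have := hi.length_le
      simp at this
    | c :: d :: t =>
      simp only [List.length_cons] at hl
      by_cases hc : c = '-' ∧ d = '-'
      · obtain ⟨h1, h2⟩ := hc
        subst h1; subst h2
        rw [pvPhiMM_two]
        intro hi
        rcases pvInfix2_cases '-' '-' '+' _ hi with ⟨he, _⟩ | hi2
        · exact absurd he (by decide)
        · exact ih t (by omega) hi2
      · rw [show pvPhiMM (c :: d :: t) = c :: pvPhiMM (d :: t) by simp [pvPhiMM, hc]]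
        intro hi
        rcases pvInfix2_cases '-' '-' c _ hi with ⟨he, hh⟩ | hi2
        · subst he
          have hd : d ≠ '-' := fun hd => hc ⟨rfl, hd⟩
          exact pvPhiMM_headne (d :: t) (by simpa using hd) hh
        · exact ih (d :: t) (by simp only [List.length_cons]; omega) hi2
-- one rewrite pass does not change the collapsed form
theorem pvCP_phiPP : ∀ n s, s.length ≤ n → pvCP (pvPhiPP s) = pvCP s := by
  intro n
  induction n with
  | zero =>
    intro s hl
    have : s = [] := List.length_eq_zero_iff.mp (Nat.le_zero.mp hl)
    subst this; simp [pvPhiPP]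
  | succ n ih =>
    intro s hl
    cases s with
    | nil => simp [pvPhiPP]
    | cons c t =>
      simp only [List.length_cons] at hl
      by_cases hc : c = '+'
      · subst hc
        obtain ⟨t', hdec, hhd⟩ := pvDecomp '+' t
        have hlt : t'.length ≤ t.length := by
          rw [hdec]; simp
        rw [show '+' :: t = List.replicate (pvRun '+' t + 1) '+' ++ t' by
          rw [List.replicate_succ, List.cons_append, ← hdec]]
        rw [pvPhiPP_run (pvRun '+' t + 1) t' hhd]
        rw [show (pvRun '+' t + 1 + 1) / 2 = (pvRun '+' t) / 2 + 1 by omega]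
        rw [pvCP_run ((pvRun '+' t) / 2) (pvPhiPP t') (pvPhiPP_headne t' hhd)]
        rw [pvCP_run (pvRun '+' t) t' hhd]
        rw [ih t' (by omega)]
      · rw [pvPhiPP_cons_ne c t hc, pvCP_cons_ne c _ hc, pvCP_cons_ne c t hc,
          ih t (by omega)]

theorem pvCM3_phiMMM : ∀ n s, s.length ≤ n → pvCM3 (pvPhiMMM s) = pvCM3 s := by
  intro n
  induction n with
  | zero =>
    intro s hl
    have : s = [] := List.length_eq_zero_iff.mp (Nat.le_zero.mp hl)
    subst this; simp [pvPhiMMM]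
  | succ n ih =>
    intro s hl
    cases s with
    | nil => simp [pvPhiMMM]
    | cons c t =>
      simp only [List.length_cons] at hl
      by_cases hc : c = '-'
      · subst hc
        obtain ⟨t', hdec, hhd⟩ := pvDecomp '-' t
        have hlt : t'.length ≤ t.length := by
          rw [hdec]; simp
        rw [show '-' :: t = List.replicate (pvRun '-' t + 1) '-' ++ t' by
          rw [List.replicate_succ, List.cons_append, ← hdec]]
        rw [pvPhiMMM_run (pvRun '-' t + 1) t' hhd]
        obtain ⟨m, hm⟩ : ∃ m, pvG (pvRun '-' t + 1) = m + 1 := by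
          have := pvG_pos (pvRun '-' t + 1) (by omega)
          exact ⟨pvG (pvRun '-' t + 1) - 1, by omega⟩
        rw [hm]
        rw [pvCM3_run m (pvPhiMMM t') (pvPhiMMM_headne t' hhd)]
        rw [pvCM3_run (pvRun '-' t) t' hhd]
        have hpar : (m + 1) % 2 = (pvRun '-' t + 1) % 2 := by
          have := pvG_mod (pvRun '-' t + 1)
          omega
        rw [hpar, ih t' (by omega)]
      · rw [pvPhiMMM_cons_ne c t hc, pvCM3_cons_ne c _ hc, pvCM3_cons_ne c t hc,
          ih t (by omega)]

-- the three while-loops compute the collapsed forms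
theorem pvLoopPP_eq : ∀ n s, s.length ≤ n → pvLoopPP s = pvCP s := by
  intro n
  induction n using Nat.strong_induction_on with
  | _ n ih =>
    intro s hl
    by_cases hin : PySem.Chars.isIn ['+', '+'] s = true
    · rw [pvLoopPP, dif_pos hin, pvReplacePP]
      have hlen : (pvPhiPP s).length < s.length := by
        rw [← pvReplacePP]
        exact pvReplace_len_lt s _ _ (by simp) (by simp) hin
      by_cases hn : n = 0
      · subst hn; omega
      · rw [ih (n - 1) (by omega) (pvPhiPP s) (by omega)]
        exact pvCP_phiPP s.length s le_rfl
    · rw [pvLoopPP, dif_neg hin]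
      have : ¬ ['+', '+'] <:+: s := by
        rw [← PySem.Chars.isIn_eq_false_iff]
        simpa using hin
      exact (pvNoPP_id s this).symm

theorem pvLoopMMM_eq : ∀ n s, s.length ≤ n → pvLoopMMM s = pvCM3 s := by
  intro n
  induction n using Nat.strong_induction_on with
  | _ n ih =>
    intro s hl
    by_cases hin : PySem.Chars.isIn ['-', '-', '-'] s = true
    · rw [pvLoopMMM, dif_pos hin, pvReplaceMMM]
      have hlen : (pvPhiMMM s).length < s.length := by
        rw [← pvReplaceMMM]
        exact pvReplace_len_lt s _ _ (by simp) (by simp) hin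
      by_cases hn : n = 0
      · subst hn; omega
      · rw [ih (n - 1) (by omega) (pvPhiMMM s) (by omega)]
        exact pvCM3_phiMMM s.length s le_rfl
    · rw [pvLoopMMM, dif_neg hin]
      have : ¬ ['-', '-', '-'] <:+: s := by
        rw [← PySem.Chars.isIn_eq_false_iff]
        simpa using hin
      exact (pvNoMMM_id s.length s le_rfl this).symm

theorem pvLoopMM_eq (s : List Char) : pvLoopMM s = pvPhiMM s := by
  by_cases hin : PySem.Chars.isIn ['-', '-'] s = true
  · rw [pvLoopMM, dif_pos hin, pvReplaceMM]
    rw [pvLoopMM, dif_neg (by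
      rw [show (¬ PySem.Chars.isIn ['-', '-'] (pvPhiMM s) = true) =
        (PySem.Chars.isIn ['-', '-'] (pvPhiMM s) = false) by simp]
      rw [PySem.Chars.isIn_eq_false_iff]
      exact pvPhiMM_noadj s.length s le_rfl)]
  · rw [pvLoopMM, dif_neg hin]
    have : ¬ ['-', '-'] <:+: s := by
      rw [← PySem.Chars.isIn_eq_false_iff]
      simpa using hin
    exact (pvNoMM_id s.length s le_rfl this).symm
-- the operator-character alphabet of the spacing pass
def pvOPS : List Char := ['-', '+', '*', '/', '(', ')', '^']

-- tokens of "word so far (reversed) = cur, remaining input = s"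
def pvLexCont : List Char → List Char → List (List Char)
  | cur, [] => if cur = [] then [] else [cur.reverse]
  | cur, c :: t =>
    if c ∈ pvOPS then (if cur = [] then [] else [cur.reverse]) ++ [c] :: pvLexCont [] t
    else if PySem.Chars.isspace c then (if cur = [] then [] else [cur.reverse]) ++ pvLexCont [] t
    else pvLexCont (c :: cur) t

theorem pvOPS_not_space (c : Char) (h : c ∈ pvOPS) : PySem.Chars.isspace c = false := by
  fin_cases h <;> decide

theorem pvGo_space (c : Char) (rest cur : List Char) (acc : List (List Char))
    (hs : PySem.Chars.isspace c = true) :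
    PySem.Chars.split₀.go (c :: rest) cur acc =
      PySem.Chars.split₀.go rest [] (if cur.isEmpty then acc else cur.reverse :: acc) := by
  rw [PySem.Chars.split₀.go, if_pos hs]
  by_cases h : cur.isEmpty = true <;> simp [h]

theorem pvGo_word (c : Char) (rest cur : List Char) (acc : List (List Char))
    (hs : PySem.Chars.isspace c = false) :
    PySem.Chars.split₀.go (c :: rest) cur acc =
      PySem.Chars.split₀.go rest (c :: cur) acc := by
  rw [PySem.Chars.split₀.go]
  simp [hs]

theorem pvSplitSpaced : ∀ u cur acc,
    PySem.Chars.split₀.go (u.flatMap fun c => if c ∈ pvOPS then [' ', c, ' '] else [c]) cur acc =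
      acc.reverse ++ pvLexCont cur u := by
  intro u
  induction u with
  | nil =>
    intro cur acc
    by_cases hc : cur = []
    · subst hc; simp [PySem.Chars.split₀.go, pvLexCont]
    · simp [PySem.Chars.split₀.go, pvLexCont, hc, List.isEmpty_iff]
  | cons c t ih =>
    intro cur acc
    by_cases hc : c ∈ pvOPS
    · have hs := pvOPS_not_space c hc
      simp only [List.flatMap_cons, hc, if_pos, List.cons_append, List.nil_append]
      rw [pvGo_space ' ' _ _ _ (by decide), pvGo_word c _ _ _ hs,
        pvGo_space ' ' _ _ _ (by decide)]
      simp only [List.isEmpty_cons, List.reverse_cons, List.reverse_nil, List.nil_append]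
      rw [ih [] _]
      by_cases hcur : cur = []
      · subst hcur; simp [pvLexCont, hc]
      · simp [pvLexCont, hc, hcur, List.isEmpty_iff]
    · by_cases hs : PySem.Chars.isspace c = true
      · simp only [List.flatMap_cons, hc, if_neg, if_false, List.singleton_append]
        rw [pvGo_space c _ _ _ hs]
        rw [ih [] _]
        by_cases hcur : cur = []
        · subst hcur; simp [pvLexCont, hc, hs]
        · simp [pvLexCont, hc, hs, hcur, List.isEmpty_iff]
      · simp only [List.flatMap_cons, hc, if_neg, if_false, List.singleton_append]
        rw [pvGo_word c _ _ _ (by simpa using hs)]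
        rw [ih (c :: cur) _]
        simp [pvLexCont, hc, hs]

theorem pvSpaced_eq (s : List Char) :
    pvSpaced s = s.flatMap fun c => if c ∈ pvOPS then [' ', c, ' '] else [c] := by
  unfold pvSpaced
  rw [show (fun (res : List Char) (c : Char) =>
      res ++ (if c ∈ ['-', '+', '*', '/', '(', ')', '^'] then [' ', c, ' '] else [c])) =
    (fun res c => res ++ (if c ∈ pvOPS then [' ', c, ' '] else [c])) from rfl]
  exact PySem.List.foldl_append_eq_flatMap _ s []

theorem pvTokensA (s : List Char) :
    PySem.Chars.split₀ (pvSpaced s) = pvLexCont [] s := by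
  rw [pvSpaced_eq]
  unfold PySem.Chars.split₀
  simpa using pvSplitSpaced s [] []
-- word-character facts
theorem pvMem_ops_iff (c : Char) : c ∈ pvOPS ↔ c ∈ ['+', '-', '*', '/', '(', ')', '^'] := by
  simp [pvOPS]; tauto

theorem pvWordChar_facts (c : Char) (h : pvWordChar c = true) :
    c ∉ pvOPS ∧ PySem.Chars.isspace c = false := by
  unfold pvWordChar at h
  simp only [Bool.and_eq_true, Bool.not_eq_true'] at h
  obtain ⟨h1, h2⟩ := h
  refine ⟨fun hm => ?_, h2⟩
  rw [pvMem_ops_iff] at hm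
  exact absurd hm (by simpa using h1)

theorem pvWordChar_ne_plus (c : Char) (h : pvWordChar c = true) : c ≠ '+' := by
  intro hc; subst hc; exact absurd h (by decide)

theorem pvWordChar_ne_minus (c : Char) (h : pvWordChar c = true) : c ≠ '-' := by
  intro hc; subst hc; exact absurd h (by decide)

-- blocks of word characters pass through every layer unchanged
theorem pvCP_word (w v : List Char) (hw : ∀ d ∈ w, pvWordChar d = true) :
    pvCP (w ++ v) = w ++ pvCP v := by
  induction w with
  | nil => simp
  | cons d w ih =>
    rw [List.cons_append, pvCP_cons_ne d _ (pvWordChar_ne_plus d (hw d (by simp))),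
      ih (fun e he => hw e (by simp [he]))]
    simp

theorem pvCM3_word (w v : List Char) (hw : ∀ d ∈ w, pvWordChar d = true) :
    pvCM3 (w ++ v) = w ++ pvCM3 v := by
  induction w with
  | nil => simp
  | cons d w ih =>
    rw [List.cons_append, pvCM3_cons_ne d _ (pvWordChar_ne_minus d (hw d (by simp))),
      ih (fun e he => hw e (by simp [he]))]
    simp

theorem pvPhiMM_word (w v : List Char) (hw : ∀ d ∈ w, pvWordChar d = true) :
    pvPhiMM (w ++ v) = w ++ pvPhiMM v := by
  induction w with
  | nil => simp
  | cons d w ih =>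
    rw [List.cons_append, pvPhiMM_cons_ne d _ (pvWordChar_ne_minus d (hw d (by simp))),
      ih (fun e he => hw e (by simp [he]))]
    simp

-- "the head (if any) is not a word character" is preserved by every layer
def pvStop (v : List Char) : Prop := ∀ d, v.head? = some d → pvWordChar d = false

theorem pvStop_cP (v : List Char) (h : pvStop v) : pvStop (pvCP v) := by
  cases v with
  | nil => intro d hd; simp [pvCP] at hd
  | cons c u =>
    by_cases hc : c = '+'
    · subst hc; rw [pvCP_cons_run]; intro d hd; simp at hd; subst hd; decide
    · rw [pvCP_cons_ne c u hc]; intro d hd; simp at hd; subst hd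
      exact h c (by simp)

theorem pvStop_cM3 (v : List Char) (h : pvStop v) : pvStop (pvCM3 v) := by
  cases v with
  | nil => intro d hd; simp [pvCM3] at hd
  | cons c u =>
    by_cases hc : c = '-'
    · subst hc; rw [pvCM3_cons_run]; intro d hd
      by_cases hp : (pvRun '-' u + 1) % 2 = 1 <;> simp [hp] at hd <;> subst hd <;> decide
    · rw [pvCM3_cons_ne c u hc]; intro d hd; simp at hd; subst hd
      exact h c (by simp)

theorem pvStop_phiMM (v : List Char) (h : pvStop v) : pvStop (pvPhiMM v) := by
  match v with
  | [] => intro d hd; simp [pvPhiMM] at hd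
  | [c] =>
    intro d hd; simp [pvPhiMM] at hd; subst hd
    exact h c (by simp)
  | c :: e :: u =>
    by_cases hc : c = '-' ∧ e = '-'
    · obtain ⟨h1, h2⟩ := hc; subst h1; subst h2
      rw [pvPhiMM_two]; intro d hd; simp at hd; subst hd; decide
    · rw [show pvPhiMM (c :: e :: u) = c :: pvPhiMM (e :: u) by simp [pvPhiMM, hc]]
      intro d hd; simp at hd; subst hd
      exact h c (by simp)

-- pvLexCont over a word block, and flushing the pending word
theorem pvLexCont_word (w : List Char) (hw : ∀ d ∈ w, pvWordChar d = true) :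
    ∀ v cur, pvLexCont cur (w ++ v) = pvLexCont (w.reverse ++ cur) v := by
  induction w with
  | nil => simp
  | cons d w ih =>
    intro v cur
    obtain ⟨hm, hs⟩ := pvWordChar_facts d (hw d (by simp))
    rw [List.cons_append, show pvLexCont cur (d :: (w ++ v)) = pvLexCont (d :: cur) (w ++ v) by
      simp [pvLexCont, hm, hs]]
    rw [ih (fun e he => hw e (by simp [he])) v (d :: cur)]
    simp

theorem pvLexCont_flush (cur v : List Char) (hcur : cur ≠ []) (hv : pvStop v) :
    pvLexCont cur v = cur.reverse :: pvLexCont [] v := by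
  cases v with
  | nil => simp [pvLexCont, hcur]
  | cons d u =>
    have hd : pvWordChar d = false := hv d (by simp)
    unfold pvWordChar at hd
    simp only [Bool.and_eq_false_iff, Bool.not_eq_false', Bool.not_eq_false] at hd
    rcases hd with hd | hd
    · have hm : d ∈ pvOPS := (pvMem_ops_iff d).mpr (by simpa using hd)
      simp [pvLexCont, hm, hcur]
    · by_cases hm : d ∈ pvOPS
      · simp [pvLexCont, hm, hcur]
      · simp [pvLexCont, hm, hd, hcur]
-- pvLexB on an explicit sign run
theorem pvLexB_run (c : Char) (hc : c = '+' ∨ c = '-') (r : Nat) (t' : List Char)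
    (hhd : t'.head? ≠ some c) :
    pvLexB (List.replicate (r + 1) c ++ t') =
      (if c = '-' ∧ (r + 1) % 2 = 0 then ['+'] else [c]) :: pvLexB t' := by
  rw [show List.replicate (r + 1) c ++ t' = c :: (List.replicate r c ++ t') by
    simp [List.replicate_succ]]
  rw [pvLexB, if_pos hc, pvRun_replicate c r t' hhd]
  show (if c = '-' ∧ (r + 1) % 2 = 0 then ['+'] else [c]) ::
      pvLexB (List.drop r (List.replicate r c ++ t')) = _
  rw [pvDropRun]

theorem pvLexMain_plus (r : Nat) (t' : List Char) (hhd : t'.head? ≠ some '+')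
    (IH : pvLexCont [] (pvPhiMM (pvCM3 (pvCP t'))) = pvLexB t') :
    pvLexCont [] (pvPhiMM (pvCM3 (pvCP (List.replicate (r + 1) '+' ++ t')))) =
      pvLexB (List.replicate (r + 1) '+' ++ t') := by
  rw [pvLexB_run '+' (Or.inl rfl) r t' hhd, if_neg (by simp)]
  rw [pvCP_run r t' hhd]
  rw [pvCM3_cons_ne '+' _ (by decide)]
  rw [pvPhiMM_cons_ne '+' _ (by decide)]
  rw [show pvLexCont [] ('+' :: pvPhiMM (pvCM3 (pvCP t'))) =
      ['+'] :: pvLexCont [] (pvPhiMM (pvCM3 (pvCP t'))) by simp [pvLexCont, pvOPS]]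
  rw [IH]

theorem pvLexMain_minus (r : Nat) (t' : List Char) (hhd : t'.head? ≠ some '-')
    (IH : pvLexCont [] (pvPhiMM (pvCM3 (pvCP t'))) = pvLexB t') :
    pvLexCont [] (pvPhiMM (pvCM3 (pvCP (List.replicate (r + 1) '-' ++ t')))) =
      pvLexB (List.replicate (r + 1) '-' ++ t') := by
  rw [pvLexB_run '-' (Or.inr rfl) r t' hhd]
  rw [show pvCP (List.replicate (r + 1) '-' ++ t') = List.replicate (r + 1) '-' ++ pvCP t' by
    have : ∀ k, pvCP (List.replicate k '-' ++ t') = List.replicate k '-' ++ pvCP t' := by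
      intro k
      induction k with
      | zero => simp
      | succ k ihk =>
        rw [List.replicate_succ, List.cons_append, pvCP_cons_ne '-' _ (by decide), ihk,
          List.cons_append]
    exact this (r + 1)]
  rw [pvCM3_run r (pvCP t') (pvCP_headne t' hhd)]
  by_cases hp : (r + 1) % 2 = 1
  · rw [if_pos hp, if_neg (fun h => absurd h.2 (by omega))]
    simp only [List.singleton_append]
    rw [pvPhiMM_cons1 _ (pvCM3_headne (pvCP t') (pvCP_headne t' hhd))]
    rw [show pvLexCont [] ('-' :: pvPhiMM (pvCM3 (pvCP t'))) =
        ['-'] :: pvLexCont [] (pvPhiMM (pvCM3 (pvCP t'))) by simp [pvLexCont, pvOPS]]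
    rw [IH]
  · rw [if_neg hp, if_pos ⟨rfl, by omega⟩]
    rw [show (['-', '-'] : List Char) ++ pvCM3 (pvCP t') = '-' :: '-' :: pvCM3 (pvCP t') by simp]
    rw [pvPhiMM_two]
    rw [show pvLexCont [] ('+' :: pvPhiMM (pvCM3 (pvCP t'))) =
        ['+'] :: pvLexCont [] (pvPhiMM (pvCM3 (pvCP t'))) by simp [pvLexCont, pvOPS]]
    rw [IH]

theorem pvLexMain : ∀ n s, s.length ≤ n →
    pvLexCont [] (pvPhiMM (pvCM3 (pvCP s))) = pvLexB s := by
  intro n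
  induction n with
  | zero =>
    intro s hl
    have : s = [] := List.length_eq_zero_iff.mp (Nat.le_zero.mp hl)
    subst this
    simp [pvCP, pvCM3, pvPhiMM, pvLexCont, pvLexB]
  | succ n ih =>
    intro s hl
    cases s with
    | nil => simp [pvCP, pvCM3, pvPhiMM, pvLexCont, pvLexB]
    | cons c t =>
      simp only [List.length_cons] at hl
      by_cases h1 : c = '+' ∨ c = '-'
      · rcases h1 with h1 | h1
        · subst h1
          obtain ⟨t', hdec, hhd⟩ := pvDecomp '+' t
          have hlt' : t'.length ≤ t.length := by rw [hdec]; simp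
          rw [show '+' :: t = List.replicate (pvRun '+' t + 1) '+' ++ t' by
            rw [List.replicate_succ, List.cons_append, ← hdec]]
          exact pvLexMain_plus (pvRun '+' t) t' hhd (ih t' (by omega))
        · subst h1
          obtain ⟨t', hdec, hhd⟩ := pvDecomp '-' t
          have hlt' : t'.length ≤ t.length := by rw [hdec]; simp
          rw [show '-' :: t = List.replicate (pvRun '-' t + 1) '-' ++ t' by
            rw [List.replicate_succ, List.cons_append, ← hdec]]
          exact pvLexMain_minus (pvRun '-' t) t' hhd (ih t' (by omega))
      · have hcp : c ≠ '+' := fun h => h1 (Or.inl h)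
        have hcm : c ≠ '-' := fun h => h1 (Or.inr h)
        by_cases h2 : c ∈ ['*', '/', '(', ')', '^']
        · rw [pvCP_cons_ne c t hcp, pvCM3_cons_ne c _ hcm, pvPhiMM_cons_ne c _ hcm]
          rw [show pvLexCont [] (c :: pvPhiMM (pvCM3 (pvCP t))) =
              [c] :: pvLexCont [] (pvPhiMM (pvCM3 (pvCP t))) by
            have hmem : c ∈ pvOPS := by fin_cases h2 <;> decide
            simp [pvLexCont, hmem]]
          rw [ih t (by omega)]
          rw [pvLexB, if_neg h1, if_pos h2]
        · by_cases h3 : PySem.Chars.isspace c = true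
          · rw [pvCP_cons_ne c t hcp, pvCM3_cons_ne c _ hcm, pvPhiMM_cons_ne c _ hcm]
            have hmem : c ∉ pvOPS := by
              rw [pvMem_ops_iff]
              simp only [List.mem_cons, List.mem_singleton]
              rintro (h | h | h | h | h | h | h) <;> simp_all
            rw [show pvLexCont [] (c :: pvPhiMM (pvCM3 (pvCP t))) =
                pvLexCont [] (pvPhiMM (pvCM3 (pvCP t))) by simp [pvLexCont, hmem, h3]]
            rw [ih t (by omega)]
            rw [pvLexB, if_neg h1, if_neg h2, if_pos h3]
          · have hnotmem : c ∉ ['+', '-', '*', '/', '(', ')', '^'] := by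
              intro hm
              simp only [List.mem_cons, List.not_mem_nil, or_false] at hm
              rcases hm with h | h | h | h | h | h | h
              · exact hcp h
              · exact hcm h
              all_goals exact h2 (by simp [h])
            have hw : pvWordChar c = true := by
              simp [pvWordChar, hnotmem, h3]
            have hww : ∀ d ∈ c :: t.takeWhile pvWordChar, pvWordChar d = true := by
              intro d hd
              rcases List.mem_cons.mp hd with h | h
              · subst h; exact hw
              · exact List.mem_takeWhile_imp h
            have hstop : pvStop (t.dropWhile pvWordChar) := by
              intro d hd
              have hh := List.head?_dropWhile_not pvWordChar t
              rw [hd] at hh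
              exact hh
            rw [pvLexB, if_neg h1, if_neg h2, if_neg h3]
            rw [show (c :: t : List Char) =
                (c :: t.takeWhile pvWordChar) ++ t.dropWhile pvWordChar by
              simp [List.takeWhile_append_dropWhile]]
            rw [pvCP_word _ _ hww, pvCM3_word _ _ hww, pvPhiMM_word _ _ hww]
            rw [pvLexCont_word _ hww _ []]
            rw [List.append_nil]
            rw [pvLexCont_flush _ _ (by simp)
              (pvStop_phiMM _ (pvStop_cM3 _ (pvStop_cP _ hstop)))]
            rw [List.reverse_reverse]
            rw [ih (t.dropWhile pvWordChar)
              (le_trans (List.length_dropWhile_le _ _) (by omega))]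
-- token shapes produced by the lexer
def pvWordy (u : List Char) : Prop := u ≠ [] ∧ ∀ d ∈ u, pvWordChar d = true
def pvGoodTok (t : List Char) : Prop := (∃ c, c ∈ pvOPS ∧ t = [c]) ∨ pvWordy t
def pvGoodStack (p : List Char) : Prop := pvGoodTok p ∨ (∃ u, pvWordy u ∧ p = '-' :: u)

theorem pvLexB_good : ∀ n s, s.length ≤ n → ∀ t ∈ pvLexB s, pvGoodTok t := by
  intro n
  induction n with
  | zero =>
    intro s hl
    have : s = [] := List.length_eq_zero_iff.mp (Nat.le_zero.mp hl)
    subst this; simp [pvLexB]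
  | succ n ih =>
    intro s hl
    cases s with
    | nil => simp [pvLexB]
    | cons c t =>
      simp only [List.length_cons] at hl
      by_cases h1 : c = '+' ∨ c = '-'
      · rw [pvLexB, if_pos h1]
        intro tok htok
        rcases List.mem_cons.mp htok with h | h
        · subst h
          by_cases hp : c = '-' ∧ (pvRun c t + 1) % 2 = 0
          · rw [if_pos hp]; exact Or.inl ⟨'+', by simp [pvOPS]⟩
          · rw [if_neg hp]
            refine Or.inl ⟨c, ?_, rfl⟩
            rcases h1 with h1 | h1 <;> subst h1 <;> simp [pvOPS]
        · exact ih (t.drop (pvRun c t)) (by simp only [List.length_drop]; omega) tok h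
      · by_cases h2 : c ∈ ['*', '/', '(', ')', '^']
        · rw [pvLexB, if_neg h1, if_pos h2]
          intro tok htok
          rcases List.mem_cons.mp htok with h | h
          · subst h
            refine Or.inl ⟨c, ?_, rfl⟩
            fin_cases h2 <;> simp [pvOPS]
          · exact ih t (by omega) tok h
        · by_cases h3 : PySem.Chars.isspace c = true
          · rw [pvLexB, if_neg h1, if_neg h2, if_pos h3]
            exact ih t (by omega)
          · rw [pvLexB, if_neg h1, if_neg h2, if_neg h3]
            intro tok htok
            rcases List.mem_cons.mp htok with h | h
            · subst h
              refine Or.inr ⟨by simp, ?_⟩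
              intro d hd
              rcases List.mem_cons.mp hd with h | h
              · rw [h]
                have hcp : c ≠ '+' := fun h => h1 (Or.inl h)
                have hcm : c ≠ '-' := fun h => h1 (Or.inr h)
                have hnotmem : c ∉ ['+', '-', '*', '/', '(', ')', '^'] := by
                  intro hm
                  simp only [List.mem_cons, List.not_mem_nil, or_false] at hm
                  rcases hm with h | h | h | h | h | h | h
                  · exact hcp h
                  · exact hcm h
                  all_goals exact h2 (by simp [h])
                simp [pvWordChar, hnotmem, h3]
              · exact List.mem_takeWhile_imp h
            · exact ih (t.dropWhile pvWordChar)
                (le_trans (List.length_dropWhile_le _ _) (by omega)) tok h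

-- substring membership on good tokens reduces to list membership / equality
theorem pvIsIn_false_of (u pat : List Char) (h : ∃ c ∈ u, c ∉ pat) :
    PySem.Chars.isIn u pat = false := by
  rw [PySem.Chars.isIn_eq_false_iff]
  intro hinf
  obtain ⟨c, hc, hn⟩ := h
  exact hn (hinf.subset hc)

theorem pvIsIn_single (c : Char) (pat : List Char) :
    PySem.Chars.isIn [c] pat = true ↔ c ∈ pat := by
  rw [PySem.Chars.isIn_iff_infix]
  constructor
  · intro h; exact h.subset (by simp)
  · intro h
    obtain ⟨s1, s2, hs⟩ := List.append_of_mem h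
    exact ⟨s1, s2, by simp [hs]⟩

theorem pvWordy_not_isIn (u pat : List Char) (hu : pvWordy u)
    (hpat : ∀ c ∈ pat, c ∈ pvOPS) : PySem.Chars.isIn u pat = false := by
  obtain ⟨hne, hw⟩ := hu
  cases u with
  | nil => exact absurd rfl hne
  | cons d u' =>
    refine pvIsIn_false_of _ _ ⟨d, by simp, fun hm => ?_⟩
    exact (pvWordChar_facts d (hw d (by simp))).1 (hpat d hm)

theorem pvMinusWordy_not_isIn (u pat : List Char) (hu : pvWordy u)
    (hpat : ∀ c ∈ pat, c ∈ pvOPS) : PySem.Chars.isIn ('-' :: u) pat = false := by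
  obtain ⟨hne, hw⟩ := hu
  cases u with
  | nil => exact absurd rfl hne
  | cons d u' =>
    refine pvIsIn_false_of _ _ ⟨d, by simp, fun hm => ?_⟩
    exact (pvWordChar_facts d (hw d (by simp))).1 (hpat d hm)

theorem pvWordy_ne_single (u : List Char) (hu : pvWordy u) (c : Char) (hc : c ∈ pvOPS) :
    u ≠ [c] := by
  intro h
  subst h
  have := hu.2 c (by simp)
  exact (pvWordChar_facts c this).1 hc

-- the two membership tests agree on every reachable stack entry
theorem pvStack_isIn6 (p : List Char) (h : pvGoodStack p) :
    (PySem.Chars.isIn p ['-', '+', '*', '/', '^', '('] = true) ↔ p ∈ pvOps6 := by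
  rcases h with (⟨c, hc, hp⟩ | hw) | ⟨u, hu, hp⟩
  · subst hp
    fin_cases hc <;> simp [pvIsIn_single, pvOps6] <;> decide
  · rw [pvWordy_not_isIn p _ hw (by intro c hc; fin_cases hc <;> simp [pvOPS])]
    simp only [Bool.false_eq_true, false_iff]
    intro hm
    rcases hw with ⟨hne, hwc⟩
    fin_cases hm <;> exact absurd (hwc _ (List.mem_cons_self ..)) (by decide)
  · subst hp
    rw [pvMinusWordy_not_isIn u _ hu (by intro c hc; fin_cases hc <;> simp [pvOPS])]
    simp only [Bool.false_eq_true, false_iff]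
    intro hm
    rcases hu with ⟨hne, hwc⟩
    simp only [pvOps6, List.mem_cons, List.not_mem_nil, or_false] at hm
    rcases hm with h | h | h | h | h | h <;> simp_all

theorem pvStack_isIn5 (p : List Char) (h : pvGoodStack p) :
    (PySem.Chars.isIn p ['-', '+', '*', '/', '^'] = true) ↔ p ∈ pvOps5 := by
  rcases h with (⟨c, hc, hp⟩ | hw) | ⟨u, hu, hp⟩
  · subst hp
    fin_cases hc <;> simp [pvIsIn_single, pvOps5] <;> decide
  · rw [pvWordy_not_isIn p _ hw (by intro c hc; fin_cases hc <;> simp [pvOPS])]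
    simp only [Bool.false_eq_true, false_iff]
    intro hm
    rcases hw with ⟨hne, hwc⟩
    fin_cases hm <;> exact absurd (hwc _ (List.mem_cons_self ..)) (by decide)
  · subst hp
    rw [pvMinusWordy_not_isIn u _ hu (by intro c hc; fin_cases hc <;> simp [pvOPS])]
    simp only [Bool.false_eq_true, false_iff]
    intro hm
    rcases hu with ⟨hne, hwc⟩
    simp only [pvOps5, List.mem_cons, List.not_mem_nil, or_false] at hm
    rcases hm with h | h | h | h | h <;> simp_all

theorem pvGoodStack_ne_nil (p : List Char) (h : pvGoodStack p) : p ≠ [] := by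
  rcases h with (⟨c, _, hp⟩ | ⟨hne, _⟩) | ⟨u, _, hp⟩ <;> subst_vars <;> simp_all
theorem pvLit_minus : PySem.Chars.isIn ['-'] ['+', '*', '/', '^'] = false := by decide
theorem pvLit_plus : PySem.Chars.isIn ['+'] ['+', '*', '/', '^'] = true := by decide
theorem pvLit_star : PySem.Chars.isIn ['*'] ['+', '*', '/', '^'] = true := by decide
theorem pvLit_slash : PySem.Chars.isIn ['/'] ['+', '*', '/', '^'] = true := by decide
theorem pvLit_caret : PySem.Chars.isIn ['^'] ['+', '*', '/', '^'] = true := by decide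
theorem pvLit_lpar : PySem.Chars.isIn ['('] ['+', '*', '/', '^'] = false := by decide
theorem pvLit_rpar : PySem.Chars.isIn [')'] ['+', '*', '/', '^'] = false := by decide

theorem pvLit6_minus : PySem.Chars.isIn ['-'] ['-', '+', '*', '/', '^', '('] = true := by decide

theorem pvOpGood (c : Char) (hc : c ∈ pvOPS) : pvGoodStack [c] := Or.inl (Or.inl ⟨c, hc, rfl⟩)

theorem pvPushGood (x : List Char) (hx : pvGoodStack x) (outRev : List (List Char))
    (hgs : ∀ p ∈ outRev, pvGoodStack p) : ∀ p ∈ x :: outRev, pvGoodStack p := by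
  intro p hp
  rcases List.mem_cons.mp hp with h | h
  · subst h; exact hx
  · exact hgs p h

theorem pvVal_eq : ∀ toks outRev br prev (unary : Bool),
    (∀ t ∈ toks, pvGoodTok t) →
    (∀ p ∈ outRev, pvGoodStack p) →
    (∃ restS, outRev = prev :: restS) →
    (unary = true ↔ (prev = ['-'] ∧ (outRev.tail = [] ∨ outRev.tail.head? = some ['(']))) →
    pvValA toks outRev br = pvValB toks outRev br.length prev unary := by
  intro toks
  induction toks with
  | nil =>
    intro outRev br prev unary _ _ _ _
    simp only [pvValA, pvValB]
    rcases Nat.eq_zero_or_pos br.length with hb | hb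
    · simp [hb]
    · rw [if_pos hb, if_pos (by omega)]
  | cons t rest ih =>
    rintro outRev br prev unary hgt hgs ⟨restS, rfl⟩ huna
    have hprev : pvGoodStack prev := hgs prev (by simp)
    have hprevne : prev ≠ [] := pvGoodStack_ne_nil prev hprev
    have hgt' : ∀ t' ∈ rest, pvGoodTok t' := fun t' h => hgt t' (by simp [h])
    have hgood_t : pvGoodTok t := hgt t (by simp)
    have E6 := pvStack_isIn6 prev hprev
    have E5 := pvStack_isIn5 prev hprev
    simp only [List.tail_cons] at huna
    rcases hgood_t with ⟨c, hc, rfl⟩ | hwt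
    · fin_cases hc
      -- t = ['-']
      · by_cases hX : PySem.Chars.isIn prev ['-', '+', '*', '/', '^'] = true
        · have hm := E5.mp hX
          simp [pvValA, pvValB, pvLit_minus, pvLit_plus, pvLit_star, pvLit_slash, pvLit_caret, pvLit_lpar, pvLit_rpar, hprevne, hX, hm]
        · have hXf : PySem.Chars.isIn prev ['-', '+', '*', '/', '^'] = false := by
            simpa using hX
          have hm : prev ∉ pvOps5 := fun h => hX (E5.mpr h)
          have hrec := ih (['-'] :: prev :: restS) br (['-'] : List Char)
            (decide (prev = ['('])) hgt'
            (pvPushGood _ (pvOpGood '-' (by simp [pvOPS])) _ hgs)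
            ⟨prev :: restS, rfl⟩ (by simp)
          simp only [pvValA, pvValB, pvLit_minus, pvLit_plus, pvLit_star, pvLit_slash, pvLit_caret, pvLit_lpar, pvLit_rpar, hprevne, hXf, hm] at hrec ⊢
          simp [hrec]
      -- t = ['+']
      · by_cases hX : PySem.Chars.isIn prev ['-', '+', '*', '/', '^', '('] = true
        · have hm := E6.mp hX
          simp [pvValA, pvValB, pvLit_minus, pvLit_plus, pvLit_star, pvLit_slash, pvLit_caret, pvLit_lpar, pvLit_rpar, hprevne, hX, hm]
        · have hXf : PySem.Chars.isIn prev ['-', '+', '*', '/', '^', '('] = false := by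
            simpa using hX
          have hm : prev ∉ pvOps6 := fun h => hX (E6.mpr h)
          have hrec := ih (['+'] :: prev :: restS) br (['+'] : List Char) false hgt'
            (pvPushGood _ (pvOpGood '+' (by simp [pvOPS])) _ hgs)
            ⟨prev :: restS, rfl⟩ (by simp)
          simp only [pvValA, pvValB, pvLit_minus, pvLit_plus, pvLit_star, pvLit_slash, pvLit_caret, pvLit_lpar, pvLit_rpar, hprevne, hXf, hm] at hrec ⊢
          simp [hrec]
      -- t = ['*']
      · by_cases hX : PySem.Chars.isIn prev ['-', '+', '*', '/', '^', '('] = true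
        · have hm := E6.mp hX
          simp [pvValA, pvValB, pvLit_minus, pvLit_plus, pvLit_star, pvLit_slash, pvLit_caret, pvLit_lpar, pvLit_rpar, hprevne, hX, hm]
        · have hXf : PySem.Chars.isIn prev ['-', '+', '*', '/', '^', '('] = false := by
            simpa using hX
          have hm : prev ∉ pvOps6 := fun h => hX (E6.mpr h)
          have hrec := ih (['*'] :: prev :: restS) br (['*'] : List Char) false hgt'
            (pvPushGood _ (pvOpGood '*' (by simp [pvOPS])) _ hgs)
            ⟨prev :: restS, rfl⟩ (by simp)
          simp only [pvValA, pvValB, pvLit_minus, pvLit_plus, pvLit_star, pvLit_slash, pvLit_caret, pvLit_lpar, pvLit_rpar, hprevne, hXf, hm] at hrec ⊢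
          simp [hrec]
      -- t = ['/']
      · by_cases hX : PySem.Chars.isIn prev ['-', '+', '*', '/', '^', '('] = true
        · have hm := E6.mp hX
          simp [pvValA, pvValB, pvLit_minus, pvLit_plus, pvLit_star, pvLit_slash, pvLit_caret, pvLit_lpar, pvLit_rpar, hprevne, hX, hm]
        · have hXf : PySem.Chars.isIn prev ['-', '+', '*', '/', '^', '('] = false := by
            simpa using hX
          have hm : prev ∉ pvOps6 := fun h => hX (E6.mpr h)
          have hrec := ih (['/'] :: prev :: restS) br (['/'] : List Char) false hgt'
            (pvPushGood _ (pvOpGood '/' (by simp [pvOPS])) _ hgs)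
            ⟨prev :: restS, rfl⟩ (by simp)
          simp only [pvValA, pvValB, pvLit_minus, pvLit_plus, pvLit_star, pvLit_slash, pvLit_caret, pvLit_lpar, pvLit_rpar, hprevne, hXf, hm] at hrec ⊢
          simp [hrec]
      -- t = ['(']
      · by_cases hX : PySem.Chars.isIn prev ['-', '+', '*', '/', '^', '('] = true
        · have hm := E6.mp hX
          have hrec := ih (['('] :: prev :: restS) (['('] :: br) (['('] : List Char)
            false hgt'
            (pvPushGood _ (pvOpGood '(' (by simp [pvOPS])) _ hgs)
            ⟨prev :: restS, rfl⟩ (by simp)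
          simp only [pvValA, pvValB, pvLit_minus, pvLit_plus, pvLit_star, pvLit_slash, pvLit_caret, pvLit_lpar, pvLit_rpar, hprevne, hX, hm, List.length_cons] at hrec ⊢
          simp [hrec]
        · have hXf : PySem.Chars.isIn prev ['-', '+', '*', '/', '^', '('] = false := by
            simpa using hX
          have hm : prev ∉ pvOps6 := fun h => hX (E6.mpr h)
          simp [pvValA, pvValB, pvLit_minus, pvLit_plus, pvLit_star, pvLit_slash, pvLit_caret, pvLit_lpar, pvLit_rpar, hprevne, hXf, hm]
      -- t = [')']
      · by_cases hX : PySem.Chars.isIn prev ['-', '+', '*', '/', '^', '('] = true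
        · have hm := E6.mp hX
          simp [pvValA, pvValB, pvLit_minus, pvLit_plus, pvLit_star, pvLit_slash, pvLit_caret, pvLit_lpar, pvLit_rpar, hprevne, hX, hm]
        · have hXf : PySem.Chars.isIn prev ['-', '+', '*', '/', '^', '('] = false := by
            simpa using hX
          have hm : prev ∉ pvOps6 := fun h => hX (E6.mpr h)
          cases br with
          | nil => simp [pvValA, pvValB, pvLit_minus, pvLit_plus, pvLit_star, pvLit_slash, pvLit_caret, pvLit_lpar, pvLit_rpar, hprevne, hXf, hm]
          | cons b brT =>
            have hrec := ih ([')'] :: prev :: restS) brT ([')'] : List Char) false hgt'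
              (pvPushGood _ (pvOpGood ')' (by simp [pvOPS])) _ hgs)
              ⟨prev :: restS, rfl⟩ (by simp)
            simp only [pvValA, pvValB, pvLit_minus, pvLit_plus, pvLit_star, pvLit_slash, pvLit_caret, pvLit_lpar, pvLit_rpar, hprevne, hXf, hm, List.length_cons] at hrec ⊢
            simp [hrec, hm]
      -- t = ['^']
      · by_cases hX : PySem.Chars.isIn prev ['-', '+', '*', '/', '^', '('] = true
        · have hm := E6.mp hX
          simp [pvValA, pvValB, pvLit_minus, pvLit_plus, pvLit_star, pvLit_slash, pvLit_caret, pvLit_lpar, pvLit_rpar, hprevne, hX, hm]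
        · have hXf : PySem.Chars.isIn prev ['-', '+', '*', '/', '^', '('] = false := by
            simpa using hX
          have hm : prev ∉ pvOps6 := fun h => hX (E6.mpr h)
          have hrec := ih (['^'] :: prev :: restS) br (['^'] : List Char) false hgt'
            (pvPushGood _ (pvOpGood '^' (by simp [pvOPS])) _ hgs)
            ⟨prev :: restS, rfl⟩ (by simp)
          simp only [pvValA, pvValB, pvLit_minus, pvLit_plus, pvLit_star, pvLit_slash, pvLit_caret, pvLit_lpar, pvLit_rpar, hprevne, hXf, hm] at hrec ⊢
          simp [hrec]
    -- t is an operand word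
    · have hne4 : PySem.Chars.isIn t ['+', '*', '/', '^'] = false :=
        pvWordy_not_isIn t _ hwt (by intro c hc; fin_cases hc <;> simp [pvOPS])
      have hnm : t ≠ ['-'] := pvWordy_ne_single t hwt '-' (by simp [pvOPS])
      have hnl : t ≠ ['('] := pvWordy_ne_single t hwt '(' (by simp [pvOPS])
      have hnr : t ≠ [')'] := pvWordy_ne_single t hwt ')' (by simp [pvOPS])
      have hnp : t ≠ ['+'] := pvWordy_ne_single t hwt '+' (by simp [pvOPS])
      have hns : t ≠ ['*'] := pvWordy_ne_single t hwt '*' (by simp [pvOPS])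
      have hnd : t ≠ ['/'] := pvWordy_ne_single t hwt '/' (by simp [pvOPS])
      have hnc : t ≠ ['^'] := pvWordy_ne_single t hwt '^' (by simp [pvOPS])
      by_cases hX : PySem.Chars.isIn prev ['-', '+', '*', '/', '^', '('] = true
      · have hm := E6.mp hX
        cases unary with
        | true =>
          obtain ⟨hpm, hdisj⟩ := huna.mp rfl
          have hrec := ih (('-' :: t) :: restS) br ('-' :: t) false hgt'
            (pvPushGood _ (Or.inr ⟨t, hwt, rfl⟩) _ (fun p hp => hgs p (by simp [hp])))
            ⟨restS, rfl⟩ (by simp [hwt.1])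
          rcases hdisj with hdisj | hdisj
          · subst hdisj
            simp only [pvValA, pvValB, pvLit_minus, pvLit_plus, pvLit_star, pvLit_slash, pvLit_caret, pvLit_lpar, pvLit_rpar, hprevne, hne4, hnm, hnl, hnr, hnp, hns, hnd, hnc,
              hX, hm, hpm] at hrec ⊢
            simp [hrec, hpm, pvLit6_minus, pvOps6]
          · cases restS with
            | nil => simp at hdisj
            | cons x xs =>
              simp only [List.head?_cons, Option.some.injEq] at hdisj
              subst hdisj
              simp only [pvValA, pvValB, pvLit_minus, pvLit_plus, pvLit_star, pvLit_slash, pvLit_caret, pvLit_lpar, pvLit_rpar, hprevne, hne4, hnm, hnl, hnr, hnp, hns, hnd, hnc,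
                hX, hm, hpm] at hrec ⊢
              simp [hrec, hpm, pvLit6_minus, pvOps6]
        | false =>
          have hnd2 : ¬ (prev = ['-'] ∧ (restS = [] ∨ restS.head? = some ['('])) := by
            rw [← huna]; simp
          have hrec := ih (t :: prev :: restS) br t false hgt'
            (pvPushGood _ (Or.inl (Or.inr hwt)) _ hgs)
            ⟨prev :: restS, rfl⟩ (by simp [hnm])
          by_cases hpm : prev = ['-']
          · have hss : restS ≠ [] ∧ restS.head? ≠ some ['('] := by
              constructor
              · intro h; exact hnd2 ⟨hpm, Or.inl h⟩
              · intro h; exact hnd2 ⟨hpm, Or.inr h⟩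
            cases restS with
            | nil => exact absurd rfl hss.1
            | cons x xs =>
              have hx : x ≠ ['('] := fun h => hss.2 (by simp [h])
              simp only [pvValA, pvValB, pvLit_minus, pvLit_plus, pvLit_star, pvLit_slash, pvLit_caret, pvLit_lpar, pvLit_rpar, hprevne, hne4, hnm, hnl, hnr, hnp, hns, hnd, hnc,
                hX, hm, hpm] at hrec ⊢
              simp [hrec, hx, pvLit6_minus, pvOps6]
          · simp only [pvValA, pvValB, pvLit_minus, pvLit_plus, pvLit_star, pvLit_slash, pvLit_caret, pvLit_lpar, pvLit_rpar, hprevne, hne4, hnm, hnl, hnr, hnp, hns, hnd, hnc,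
              hX, hm, hpm] at hrec ⊢
            simp [hrec, hpm, pvLit6_minus, pvOps6]
      · have hXf : PySem.Chars.isIn prev ['-', '+', '*', '/', '^', '('] = false := by
          simpa using hX
        have hm : prev ∉ pvOps6 := fun h => hX (E6.mpr h)
        simp [pvValA, pvValB, pvLit_minus, pvLit_plus, pvLit_star, pvLit_slash, pvLit_caret, pvLit_lpar, pvLit_rpar, hprevne, hne4, hnm, hnl, hnr, hnp, hns, hnd, hnc, hXf, hm]
theorem pvVal_init (toks : List (List Char)) (hg : ∀ t ∈ toks, pvGoodTok t) :
    pvValA toks [] [] = pvValB toks [] 0 [] false := by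
  cases toks with
  | nil => simp [pvValA, pvValB]
  | cons t rest =>
    have hgood := hg t (by simp)
    have hgr : ∀ t' ∈ rest, pvGoodTok t' := fun t' h => hg t' (by simp [h])
    have htne : t ≠ [] := by
      rcases hgood with ⟨c, _, rfl⟩ | ⟨hne, _⟩ <;> simp_all
    have hstack : pvGoodStack t := Or.inl hgood
    by_cases h1 : t = ['(']
    · subst h1
      have hrec := pvVal_eq rest [['(']] [['(']] ['('] false hgr
        (by intro p hp; simp at hp; subst hp; exact hstack)
        ⟨[], rfl⟩ (by simp)
      simp only [List.length_cons, List.length_nil] at hrec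
      simp [pvValA, pvValB, hrec]
    · by_cases h2 : t = [')']
      · subst h2
        simp [pvValA, pvValB]
      · have hrec := pvVal_eq rest [t] [] t (decide (t = ['-'])) hgr
          (by intro p hp; simp at hp; subst hp; exact hstack)
          ⟨[], rfl⟩ (by simp)
        simp only [List.length_nil] at hrec
        simp [pvValA, pvValB, h1, h2, hrec, htne]

theorem pvMain (expr : String) : error_syntax expr = error_syntax_alt expr := by
  unfold error_syntax error_syntax_alt
  show List.map String.ofList
      (pvValA (PySem.Chars.split₀
        (pvSpaced (pvLoopMM (pvLoopMMM (pvLoopPP expr.toList))))) [] []) =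
    List.map String.ofList (pvValB (pvLexB expr.toList) [] 0 [] false)
  rw [pvLoopPP_eq expr.toList.length expr.toList le_rfl,
    pvLoopMMM_eq (pvCP expr.toList).length _ le_rfl,
    pvLoopMM_eq, pvTokensA,
    pvLexMain expr.toList.length expr.toList le_rfl,
    pvVal_init (pvLexB expr.toList) (pvLexB_good expr.toList.length expr.toList le_rfl)]

-- ===== VERDICT (by name: the statement is the Claim_ definition above) =====
theorem error_syntax_spec : Claim_equal_error_syntax := by
  intro expr _
  exact pvMain expr
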